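-- pv_equiv track=rewrite | github.com/bzheres/n2av2 | backend/app/services/apkg_export.py | _markdownish_to_plaintext
-- ===== SOURCE A (Python) =====
-- def _markdownish_to_plaintext(s: str) -> str:
--     """
--     Normalize a small subset of Notion/Markdown-like formatting
--     BEFORE HTML escaping.
--     """
--     if not s:
--         return ""
--
--     s = s.replace("\r\n", "\n").replace("\r", "\n")
--
--     lines = s.split("\n")
--     out_lines = []
--
--     for line in lines:
--         stripped = line.lstrip()
--
--         # Convert bullets: "- item" or "* item" → "• item"
--         if stripped.startswith("- ") or stripped.startswith("* "):
--             indent = len(line) - len(stripped)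
--             out_lines.append((" " * indent) + "• " + stripped[2:])
--         else:
--             out_lines.append(line)
--
--     return "\n".join(out_lines)
-- ===== SOURCE B (Python) =====
-- def _markdownish_to_plaintext(s: str) -> str:
--     # One left-to-right scan over the raw string: no pre-normalization pass,
--     # no split/join; bullets are rewritten at each line start, newlines are
--     # normalized on the fly.
--     out = []
--     i = 0
--     n = len(s)
--     while i < n:
--         # skip leading spaces/tabs of the line
--         j = i
--         while j < n and (s[j] == " " or s[j] == "\t"):
--             j += 1
--         # bullet marker at line start?
--         if j + 1 < n and (s[j] == "-" or s[j] == "*") and s[j + 1] == " ":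
--             out.append(" " * (j - i) + "\u2022 ")
--             i = j + 2
--         # copy the rest of the line verbatim
--         while i < n and s[i] != "\n" and s[i] != "\r":
--             out.append(s[i])
--             i += 1
--         # normalize the line terminator
--         if i < n:
--             out.append("\n")
--             if s[i] == "\r" and i + 1 < n and s[i + 1] == "\n":
--                 i += 2
--             else:
--                 i += 1
--     return "".join(out)
-- ===== Notes on version B (the rewrite author's own statement) =====
-- stated objective: alternative
-- what changed: A normalizes CRLF/CR in two replace passes, splits into lines, lstrips and rebuilds each line, and joins; B is a single left-to-right scan over the raw string that skips leading spaces/tabs, rewrites a bullet marker in place, copies the line verbatim and normalizes each newline on the fly.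
import Mathlib
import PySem

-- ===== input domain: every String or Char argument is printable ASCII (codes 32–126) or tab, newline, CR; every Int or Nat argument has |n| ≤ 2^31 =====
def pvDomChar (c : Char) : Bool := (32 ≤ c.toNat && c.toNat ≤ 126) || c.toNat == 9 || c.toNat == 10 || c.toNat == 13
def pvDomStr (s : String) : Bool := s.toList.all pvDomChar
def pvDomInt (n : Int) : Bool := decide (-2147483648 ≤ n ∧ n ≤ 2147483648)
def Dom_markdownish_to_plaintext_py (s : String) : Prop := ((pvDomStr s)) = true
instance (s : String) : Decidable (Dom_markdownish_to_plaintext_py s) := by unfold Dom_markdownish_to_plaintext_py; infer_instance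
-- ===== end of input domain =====

-- B replaces A's three passes (newline normalization, split into lines, rebuild and join) by a
-- single left-to-right scan that rewrites bullets at each line start and normalizes newlines on
-- the fly (objective: alternative single-pass algorithm, same asymptotic cost).


-- ===== PORT A =====
-- the body of A's per-line loop: lstrip, bullet test, indentation rebuilt as spaces
def pyA_line (line : List Char) : List Char :=
  let stripped := PySem.Chars.lstrip line
  if PySem.Chars.startswith stripped ['-', ' '] || PySem.Chars.startswith stripped ['*', ' '] then
    List.replicate (line.length - stripped.length) ' ' ++ ['•', ' '] ++ PySem.List.slice stripped (some 2) none
  else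
    line

def markdownish_to_plaintext_py (s : String) : String :=
  if s.toList.isEmpty then "" else
    let cs := PySem.Chars.replace (PySem.Chars.replace s.toList ['\r', '\n'] ['\n']) ['\r'] ['\n']
    let lines := PySem.Chars.splitOn cs ['\n']
    let outLines := lines.foldl (fun acc line => acc ++ [pyA_line line]) []
    String.mk (PySem.Chars.join ['\n'] outLines)

-- ===== PORT B =====
def pyB_isST (c : Char) : Bool := c == ' ' || c == '\t'

-- inner while loop: count and skip the line's leading spaces/tabs
def pyB_ws : List Char → Nat × List Char
  | [] => (0, [])
  | c :: t => if pyB_isST c then let (k, r) := pyB_ws t; (k + 1, r) else (0, c :: t)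

-- inner while loop: copy the line verbatim up to the next '\n'/'\r'
def pyB_copy : List Char → List Char × List Char
  | [] => ([], [])
  | c :: t =>
    if c == '\n' || c == '\r' then ([], c :: t)
    else let (o, r) := pyB_copy t; (c :: o, r)

-- outer while loop of Source B (fuel bounds the remaining length; the loop consumes ≥ 1 char per turn)
def pyB_go : Nat → List Char → List Char
  | 0, _ => []
  | _ + 1, [] => []
  | fuel + 1, cs =>
    let (k, body) := pyB_ws cs
    let (pre, cs1) :=
      match body with
      | c :: d :: t =>
        if (c == '-' || c == '*') && d == ' ' then (List.replicate k ' ' ++ ['•', ' '], t) else ([], cs)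
      | _ => ([], cs)
    let (line, rest) := pyB_copy cs1
    match rest with
    | [] => pre ++ line
    | '\r' :: '\n' :: t => pre ++ line ++ '\n' :: pyB_go fuel t
    | _ :: t => pre ++ line ++ '\n' :: pyB_go fuel t

def markdownish_to_plaintext_py_alt (s : String) : String :=
  String.mk (pyB_go (s.toList.length + 1) s.toList)

-- ===== PRECONDITION & SPEC =====
def Spec_markdownish_to_plaintext_py (s : String) (out : String) : Prop := out = markdownish_to_plaintext_py_alt s
instance (s : String) (out : String) : Decidable (Spec_markdownish_to_plaintext_py s out) := by unfold Spec_markdownish_to_plaintext_py; infer_instance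

-- ===== CLAIM (what is proved, stated in full; the proofs are below) =====
def Claim_equal_markdownish_to_plaintext_py : Prop := ∀ (s : String), Dom_markdownish_to_plaintext_py s → Spec_markdownish_to_plaintext_py s (markdownish_to_plaintext_py s)

-- ===== LEMMAS AND PROOFS =====

-- reference semantics of A's first replace: "\r\n" → "\n"
def nrm1 : List Char → List Char
  | [] => []
  | '\r' :: '\n' :: t => '\n' :: nrm1 t
  | c :: t => c :: nrm1 t
termination_by l => l.length
decreasing_by all_goals simp

-- reference semantics of A's second replace: "\r" → "\n" (single-char replace is a map)
def nrm2 (l : List Char) : List Char := l.map fun c => if c = '\r' then '\n' else c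

-- prepend a prefix to the first piece of a split (split results are never empty)
def consPre (p : List Char) : List (List Char) → List (List Char)
  | [] => [p]
  | h :: t => (p ++ h) :: t

-- reference semantics of split on "\n"
def splitNl : List Char → List (List Char)
  | [] => [[]]
  | c :: t => if c = '\n' then [] :: splitNl t else consPre [c] (splitNl t)

-- lines of the raw string, with "\r\n" / "\r" / "\n" all terminating a line
def LN : List Char → List (List Char)
  | [] => [[]]
  | '\r' :: '\n' :: t => [] :: LN t
  | c :: t =>
    if c = '\n' ∨ c = '\r' then [] :: LN t else consPre [c] (LN t)
termination_by l => l.length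
decreasing_by all_goals simp

lemma consPre_ne_nil (p : List Char) (ls : List (List Char)) : consPre p ls ≠ [] := by
  cases ls <;> simp [consPre]

lemma consPre_nil (ls : List (List Char)) (h : ls ≠ []) : consPre [] ls = ls := by
  cases ls with
  | nil => exact absurd rfl h
  | cons a t => simp [consPre]

lemma consPre_consPre (p q : List Char) (ls : List (List Char)) :
    consPre p (consPre q ls) = consPre (p ++ q) ls := by
  cases ls <;> simp [consPre]

lemma splitNl_ne_nil (l : List Char) : splitNl l ≠ [] := by
  cases l with
  | nil => simp [splitNl]
  | cons c t =>
    rw [splitNl]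
    split
    · simp
    · exact consPre_ne_nil _ _

lemma LN_ne_nil (l : List Char) : LN l ≠ [] := by
  rw [LN.eq_def]
  split
  · simp
  · simp
  · split
    · simp
    · exact consPre_ne_nil _ _

lemma go1_spec (fuel : Nat) : ∀ (l acc : List Char), l.length ≤ fuel →
    PySem.Chars.replace.go ['\r', '\n'] ['\n'] fuel l acc = acc.reverse ++ nrm1 l := by
  induction fuel with
  | zero =>
    intro l acc h
    have hl : l = [] := List.eq_nil_of_length_eq_zero (Nat.le_zero.mp h)
    subst hl; simp [PySem.Chars.replace.go, nrm1]
  | succ n ih =>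
    intro l acc h
    cases l with
    | nil => simp [PySem.Chars.replace.go, nrm1]
    | cons c t =>
      by_cases hpre : (['\r', '\n'] : List Char).isPrefixOf (c :: t) = true
      · have hc : c = '\r' ∧ ∃ t2, t = '\n' :: t2 := by
          cases t with
          | nil => simp [List.isPrefixOf] at hpre
          | cons d t2 =>
            simp [List.isPrefixOf] at hpre
            exact ⟨hpre.1.symm, t2, by rw [hpre.2]⟩
        obtain ⟨hc, t2, ht⟩ := hc
        subst hc; subst ht
        rw [PySem.Chars.replace.go, if_pos hpre]
        rw [show nrm1 ('\r' :: '\n' :: t2) = '\n' :: nrm1 t2 from by rw [nrm1]]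
        rw [ih _ _ (by simp at h ⊢; omega)]
        simp
      · rw [PySem.Chars.replace.go, if_neg hpre]
        rw [ih _ _ (by simp at h ⊢; omega)]
        rw [nrm1.eq_3]
        · simp
        · intro t1 hc ht
          subst hc; subst ht
          simp [List.isPrefixOf] at hpre

lemma go2_spec (fuel : Nat) : ∀ (l acc : List Char), l.length ≤ fuel →
    PySem.Chars.replace.go ['\r'] ['\n'] fuel l acc = acc.reverse ++ nrm2 l := by
  induction fuel with
  | zero =>
    intro l acc h
    have hl : l = [] := List.eq_nil_of_length_eq_zero (Nat.le_zero.mp h)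
    subst hl; simp [PySem.Chars.replace.go, nrm2]
  | succ n ih =>
    intro l acc h
    cases l with
    | nil => simp [PySem.Chars.replace.go, nrm2]
    | cons c t =>
      by_cases hpre : (['\r'] : List Char).isPrefixOf (c :: t) = true
      · have hc : c = '\r' := by simp [List.isPrefixOf] at hpre; exact hpre.symm
        subst hc
        rw [PySem.Chars.replace.go, if_pos hpre]
        rw [ih _ _ (by simp at h ⊢; omega)]
        simp [nrm2]
      · have hc : c ≠ '\r' := by simp [List.isPrefixOf] at hpre; exact fun h' => hpre h'.symm
        rw [PySem.Chars.replace.go, if_neg hpre]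
        rw [ih _ _ (by simp at h ⊢; omega)]
        simp [nrm2, hc]

lemma splitgo_spec (fuel : Nat) : ∀ (l cur : List Char) (acc : List (List Char)), l.length < fuel →
    PySem.Chars.splitOn.go ['\n'] fuel l cur acc = acc.reverse ++ consPre cur.reverse (splitNl l) := by
  induction fuel with
  | zero => intro l cur acc h; omega
  | succ n ih =>
    intro l cur acc h
    cases l with
    | nil => simp [PySem.Chars.splitOn.go, splitNl, consPre]
    | cons c t =>
      by_cases hpre : (['\n'] : List Char).isPrefixOf (c :: t) = true
      · have hc : c = '\n' := by simp [List.isPrefixOf] at hpre; exact hpre.symm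
        subst hc
        rw [PySem.Chars.splitOn.go, if_pos hpre]
        rw [ih _ _ _ (by simp at h ⊢; omega)]
        cases hs : splitNl t with
        | nil => exact absurd hs (splitNl_ne_nil t)
        | cons a s => simp [splitNl, consPre, hs]
      · have hc : c ≠ '\n' := by simp [List.isPrefixOf] at hpre; exact fun h' => hpre h'.symm
        rw [PySem.Chars.splitOn.go, if_neg hpre]
        rw [ih _ _ _ (by simp at h ⊢; omega)]
        cases hs : splitNl t with
        | nil => exact absurd hs (splitNl_ne_nil t)
        | cons a s => simp [splitNl, consPre, hs, hc]

lemma replace_rn (cs : List Char) : PySem.Chars.replace cs ['\r', '\n'] ['\n'] = nrm1 cs := by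
  rw [PySem.Chars.replace]
  simp only [List.isEmpty_cons]
  exact go1_spec cs.length cs [] le_rfl

lemma replace_r (cs : List Char) : PySem.Chars.replace cs ['\r'] ['\n'] = nrm2 cs := by
  rw [PySem.Chars.replace]
  simp only [List.isEmpty_cons]
  exact go2_spec cs.length cs [] le_rfl

lemma split_spec (cs : List Char) : PySem.Chars.splitOn cs ['\n'] = splitNl cs := by
  rw [PySem.Chars.splitOn]
  rw [splitgo_spec (cs.length + 1) cs [] [] (by omega)]
  simp [consPre_nil _ (splitNl_ne_nil cs)]

lemma LN_eq (cs : List Char) : splitNl (nrm2 (nrm1 cs)) = LN cs := by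
  induction cs using nrm1.induct with
  | case1 => simp [nrm1, nrm2, splitNl, LN]
  | case2 t ih =>
    rw [show nrm1 ('\r' :: '\n' :: t) = '\n' :: nrm1 t from by rw [nrm1]]
    rw [show LN ('\r' :: '\n' :: t) = [] :: LN t from by rw [LN]]
    simp only [nrm2, List.map_cons] at ih ⊢
    rw [splitNl]
    simp [ih]
  | case3 c t hno ih =>
    rw [nrm1.eq_3 _ _ hno, LN.eq_3 _ _ hno]
    simp only [nrm2] at ih
    by_cases h1 : c = '\n'
    · subst h1; simp [nrm2, splitNl, ih]
    · by_cases h2 : c = '\r'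
      · subst h2; simp [nrm2, splitNl, ih]
      · simp [nrm2, splitNl, ih, h1, h2]

lemma char_eq_iff_toNat (c d : Char) : c = d ↔ c.toNat = d.toNat :=
  ⟨fun h => h ▸ rfl, fun h => Char.ext (UInt32.toNat_inj.mp h)⟩

-- on a line of the admitted domain (no '\n'/'\r'), Python whitespace is exactly space-or-tab
lemma char_isspace (c : Char) (hd : pvDomChar c = true) (h10 : c ≠ '\n') (h13 : c ≠ '\r') :
    PySem.Chars.isspace c = pyB_isST c := by
  have h10' : c.toNat ≠ 10 := fun h => h10 ((char_eq_iff_toNat c '\n').mpr h)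
  have h13' : c.toNat ≠ 13 := fun h => h13 ((char_eq_iff_toNat c '\r').mpr h)
  have h32 : (c = ' ') = (c.toNat = 32) := propext (char_eq_iff_toNat c ' ')
  have h9 : (c = '\t') = (c.toNat = 9) := propext (char_eq_iff_toNat c '\t')
  simp only [pvDomChar, Bool.or_eq_true, Bool.and_eq_true, decide_eq_true_eq, beq_iff_eq] at hd
  simp only [PySem.Chars.isspace, pyB_isST]
  apply Bool.eq_iff_iff.mpr
  simp only [Bool.or_eq_true, Bool.and_eq_true, decide_eq_true_eq, beq_iff_eq, h32, h9]
  omega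

lemma pyB_ws_eq (l : List Char) :
    pyB_ws l = ((l.takeWhile pyB_isST).length, l.dropWhile pyB_isST) := by
  induction l with
  | nil => simp [pyB_ws]
  | cons c t ih =>
    by_cases h : pyB_isST c = true
    · simp [pyB_ws, h, ih]
    · simp [pyB_ws, h]

lemma pyB_copy_eq (x r : List Char) (hx : ∀ c ∈ x, (c == '\n' || c == '\r') = false)
    (hr : r = [] ∨ (∃ t, r = '\n' :: t) ∨ (∃ t, r = '\r' :: t)) :
    pyB_copy (x ++ r) = (x, r) := by
  induction x with
  | nil =>
    rcases hr with h | ⟨t, h⟩ | ⟨t, h⟩ <;> subst h <;> simp [pyB_copy]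
  | cons c x' ih =>
    have hc := hx c (by simp)
    simp only [List.cons_append]
    rw [pyB_copy, if_neg (by simp [hc])]
    rw [ih (fun d hd => hx d (by simp [hd]))]

lemma LN_append (line r : List Char) (h : ∀ c ∈ line, c ≠ '\n' ∧ c ≠ '\r') :
    LN (line ++ r) = consPre line (LN r) := by
  induction line with
  | nil => simp [consPre_nil _ (LN_ne_nil r)]
  | cons c line' ih =>
    have hc := h c (by simp)
    simp only [List.cons_append]
    rw [LN.eq_3 _ _ (fun t1 hceq _ => hc.2 hceq)]
    rw [if_neg (by rintro (h1 | h2); exacts [hc.1 h1, hc.2 h2])]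
    rw [ih (fun d hd => h d (by simp [hd]))]
    rw [consPre_consPre]
    rfl

-- the leading space/tab prefix of a line is unaffected by the rest of the string
lemma tw_append (line r : List Char)
    (hr : r = [] ∨ (∃ t, r = '\n' :: t) ∨ (∃ t, r = '\r' :: t)) :
    (line ++ r).takeWhile pyB_isST = line.takeWhile pyB_isST ∧
      (line ++ r).dropWhile pyB_isST = line.dropWhile pyB_isST ++ r := by
  induction line with
  | nil =>
    rcases hr with h | ⟨t, h⟩ | ⟨t, h⟩ <;> subst h <;> simp [pyB_isST]
  | cons c line' ih =>
    by_cases h : pyB_isST c = true <;>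
      simp [h, ih]

-- A's lstrip, on a domain line, is B's space/tab dropWhile
lemma lstrip_eq (line : List Char) (hdom : ∀ c ∈ line, pvDomChar c = true)
    (hnl : ∀ c ∈ line, (c == '\n' || c == '\r') = false) :
    PySem.Chars.lstrip line = line.dropWhile pyB_isST := by
  unfold PySem.Chars.lstrip
  induction line with
  | nil => simp
  | cons c t ih =>
    have h1 : c ≠ '\n' ∧ c ≠ '\r' := by
      have := hnl c (by simp); simp at this; exact this
    rw [List.dropWhile_cons, List.dropWhile_cons,
        char_isspace c (hdom c (by simp)) h1.1 h1.2]
    split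
    · exact ih (fun d hd => hdom d (by simp [hd])) (fun d hd => hnl d (by simp [hd]))
    · rfl

-- A's per-line transformation, expressed on the space/tab decomposition that B computes
lemma pyA_line_char (line : List Char) (hdom : ∀ c ∈ line, pvDomChar c = true)
    (hnl : ∀ c ∈ line, (c == '\n' || c == '\r') = false) :
    pyA_line line =
      match line.dropWhile pyB_isST with
      | c :: d :: t =>
        if (c == '-' || c == '*') && d == ' ' then
          List.replicate (line.takeWhile pyB_isST).length ' ' ++ ['•', ' '] ++ t
        else line
      | _ => line := by
  unfold pyA_line
  rw [lstrip_eq line hdom hnl]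
  have hlen : (line.takeWhile pyB_isST).length + (line.dropWhile pyB_isST).length = line.length := by
    conv_rhs => rw [← List.takeWhile_append_dropWhile (p := pyB_isST) (l := line)]
    rw [List.length_append]
  cases hb : line.dropWhile pyB_isST with
  | nil => simp [PySem.Chars.startswith, List.isPrefixOf]
  | cons c b' =>
    cases b' with
    | nil => simp [PySem.Chars.startswith, List.isPrefixOf]
    | cons d b'' =>
      simp only [PySem.Chars.startswith, List.isPrefixOf, Bool.and_true]
      by_cases hcond : ((c == '-' || c == '*') && d == ' ') = true
      · rw [if_pos (by simp at hcond ⊢; rcases hcond with ⟨h1 | h1, h2⟩ <;> simp [h1, h2])]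
        rw [if_pos hcond]
        rw [PySem.List.slice_from _ (by omega)]
        have : line.length - (c :: d :: b'').length = (line.takeWhile pyB_isST).length := by
          rw [hb] at hlen; simp at hlen ⊢; omega
        rw [this]
        rfl
      · rw [if_neg (by
            simp at hcond ⊢
            constructor
            · intro h1 h2; exact hcond (Or.inl h1.symm) h2.symm
            · intro h1 h2; exact hcond (Or.inr h1.symm) h2.symm)]
        rw [if_neg hcond]

lemma dropWhile_head_false (l : List Char) (p : Char → Bool) (d : Char) (r' : List Char)
    (h : l.dropWhile p = d :: r') : p d = false := by
  induction l with
  | nil => simp at h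
  | cons c t ih =>
    rw [List.dropWhile_cons] at h
    split at h
    · exact ih h
    · next hc => cases h; simpa using hc

lemma joinLN_nil (line : List Char) (hnlP : ∀ c ∈ line, c ≠ '\n' ∧ c ≠ '\r') :
    PySem.Chars.join ['\n'] ((LN (line ++ [])).map pyA_line) = pyA_line line := by
  rw [LN_append line [] hnlP]
  rw [show LN ([] : List Char) = [[]] from by rw [LN]]
  simp [consPre, PySem.Chars.join_singleton]

lemma joinLN_cons (line r : List Char) (hnlP : ∀ c ∈ line, c ≠ '\n' ∧ c ≠ '\r')
    (hLN : LN r = [] :: LN r') :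
    PySem.Chars.join ['\n'] ((LN (line ++ r)).map pyA_line) =
      pyA_line line ++ '\n' :: PySem.Chars.join ['\n'] ((LN r').map pyA_line) := by
  rw [LN_append line r hnlP, hLN]
  obtain ⟨h0, tl, hLNt⟩ : ∃ h0 tl, LN r' = h0 :: tl :=
    match hx : LN r' with
    | [] => absurd hx (LN_ne_nil _)
    | a :: b => ⟨a, b, rfl⟩
  rw [hLNt]
  simp [consPre, PySem.Chars.join_cons_cons]

lemma LN_nl (t : List Char) : LN ('\n' :: t) = [] :: LN t := by
  rw [LN.eq_3 _ _ (by intro t1 hx _; exact absurd hx (by decide))]; simp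

lemma LN_rn (t : List Char) : LN ('\r' :: '\n' :: t) = [] :: LN t := by rw [LN]

lemma LN_r (d : Char) (t' : List Char) (hd : d ≠ '\n') :
    LN ('\r' :: d :: t') = [] :: LN (d :: t') := by
  rw [LN.eq_3 _ _ (by intro t1 _ hx; cases hx; exact hd rfl)]
  simp

lemma LN_r1 : LN ['\r'] = [] :: LN [] := by
  rw [LN.eq_3 _ _ (by intro t1 _ hx; cases hx)]
  simp

lemma main_lemma (fuel : Nat) : ∀ (cs : List Char), cs.length < fuel →
    (∀ c ∈ cs, pvDomChar c = true) →
    pyB_go fuel cs = PySem.Chars.join ['\n'] ((LN cs).map pyA_line) := by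
  induction fuel with
  | zero => intro cs h _; omega
  | succ n ih =>
    intro cs hlen hdom
    by_cases hecs : cs = []
    · subst hecs
      rw [show pyB_go (n + 1) [] = [] from rfl]
      rw [show LN [] = [[]] from by rw [LN]]
      rw [List.map_cons, List.map_nil, PySem.Chars.join_singleton]
      rfl
    · obtain ⟨line, r, hsplit, hnlB, hr, hdomline, hdomr⟩ :
          ∃ line r : List Char, line ++ r = cs ∧
            (∀ c ∈ line, (c == '\n' || c == '\r') = false) ∧
            (r = [] ∨ (∃ t, r = '\n' :: t) ∨ (∃ t, r = '\r' :: t)) ∧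
            (∀ c ∈ line, pvDomChar c = true) ∧ (∀ c ∈ r, pvDomChar c = true) := by
        refine ⟨cs.takeWhile (fun c => !(c == '\n' || c == '\r')),
                cs.dropWhile (fun c => !(c == '\n' || c == '\r')),
                List.takeWhile_append_dropWhile, ?_, ?_, ?_, ?_⟩
        · intro c hc
          have := List.mem_takeWhile_imp hc
          simpa using this
        · cases hre : cs.dropWhile (fun c => !(c == '\n' || c == '\r')) with
          | nil => exact Or.inl rfl
          | cons d r' =>
            have hd : (!(d == '\n' || d == '\r')) = false :=
              dropWhile_head_false cs _ d r' hre
            simp at hd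
            by_cases h1 : d = '\n'
            · exact Or.inr (Or.inl ⟨r', by rw [h1]⟩)
            · exact Or.inr (Or.inr ⟨r', by rw [hd h1]⟩)
        · exact fun c hc => hdom c ((List.takeWhile_sublist _).subset hc)
        · exact fun c hc => hdom c ((List.dropWhile_sublist _).subset hc)
      subst hsplit
      have hnlP : ∀ c ∈ line, c ≠ '\n' ∧ c ≠ '\r' := by
        intro c hc; have := hnlB c hc; simp at this; exact this
      have hAq := pyA_line_char line hdomline hnlB
      rw [pyB_go.eq_3 _ _ (fun h => hecs h)]
      rw [pyB_ws_eq, (tw_append line r hr).1, (tw_append line r hr).2]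
      cases hb : line.dropWhile pyB_isST with
      | nil =>
        have hAeq : pyA_line line = line := by rw [hAq, hb]
        have hJnil : PySem.Chars.join ['\n'] ((LN line).map pyA_line) = line := by
          have h2 := joinLN_nil line hnlP
          simp only [List.append_nil] at h2
          rw [h2, hAeq]
        rcases hr with h | ⟨t, h⟩ | ⟨t, h⟩ <;> subst h
        · have hcopy : pyB_copy (line ++ []) = (line, []) := pyB_copy_eq line [] hnlB (Or.inl rfl)
          simp only [List.append_nil] at hcopy ⊢
          simp [hcopy, hJnil]
        · -- r = '\n' :: t
          have hrec := ih t (by simp at hlen; omega) (fun c hc => hdomr c (by simp [hc]))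
          have hgo : pyB_go n [] = [] := by cases n <;> rfl
          have hJ : PySem.Chars.join ['\n'] ((LN (line ++ '\n' :: t)).map pyA_line) =
              line ++ '\n' :: PySem.Chars.join ['\n'] ((LN t).map pyA_line) := by
            rw [joinLN_cons line ('\n' :: t) hnlP (LN_nl t), hAeq]
          have hcopy : pyB_copy (line ++ '\n' :: t) = (line, '\n' :: t) :=
            pyB_copy_eq line _ hnlB (Or.inr (Or.inl ⟨t, rfl⟩))
          cases t with
          | nil =>
            have hend : PySem.Chars.join ['\n'] ((LN ([] : List Char)).map pyA_line) = [] := by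
              rw [show LN ([] : List Char) = [[]] from by rw [LN]]
              rw [List.map_cons, List.map_nil, PySem.Chars.join_singleton]
              rfl
            rw [hend] at hJ
            simp [hcopy, hJ, hgo]
          | cons e t2 => simp [hcopy, hJ, hrec]
        · -- r = '\r' :: t
          cases t with
          | nil =>
            have hgo : pyB_go n [] = [] := by cases n <;> rfl
            have hend : PySem.Chars.join ['\n'] ((LN ([] : List Char)).map pyA_line) = [] := by
              rw [show LN ([] : List Char) = [[]] from by rw [LN]]
              rw [List.map_cons, List.map_nil, PySem.Chars.join_singleton]
              rfl
            have hJ : PySem.Chars.join ['\n'] ((LN (line ++ ['\r'])).map pyA_line) =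
                line ++ ['\n'] := by
              rw [joinLN_cons line ['\r'] hnlP LN_r1, hAeq, hend]
            have hcopy : pyB_copy (line ++ ['\r']) = (line, ['\r']) :=
              pyB_copy_eq line _ hnlB (Or.inr (Or.inr ⟨[], rfl⟩))
            simp [hcopy, hJ, hgo]
          | cons d t2 =>
            by_cases hd : d = '\n'
            · subst hd
              have hrec := ih t2 (by simp at hlen; omega)
                (fun c hc => hdomr c (by simp [hc]))
              have hJ : PySem.Chars.join ['\n'] ((LN (line ++ '\r' :: '\n' :: t2)).map pyA_line) =
                  line ++ '\n' :: PySem.Chars.join ['\n'] ((LN t2).map pyA_line) := by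
                rw [joinLN_cons line ('\r' :: '\n' :: t2) hnlP (LN_rn t2), hAeq]
              have hcopy : pyB_copy (line ++ '\r' :: '\n' :: t2) = (line, '\r' :: '\n' :: t2) :=
                pyB_copy_eq line _ hnlB (Or.inr (Or.inr ⟨'\n' :: t2, rfl⟩))
              simp [hcopy, hJ, hrec]
            · have hrec := ih (d :: t2) (by simp at hlen ⊢; omega)
                (fun c hc => hdomr c (by simp at hc ⊢; tauto))
              have hJ : PySem.Chars.join ['\n'] ((LN (line ++ '\r' :: d :: t2)).map pyA_line) =
                  line ++ '\n' :: PySem.Chars.join ['\n'] ((LN (d :: t2)).map pyA_line) := by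
                rw [joinLN_cons line ('\r' :: d :: t2) hnlP (LN_r d t2 hd), hAeq]
              have hcopy : pyB_copy (line ++ '\r' :: d :: t2) = (line, '\r' :: d :: t2) :=
                pyB_copy_eq line _ hnlB (Or.inr (Or.inr ⟨d :: t2, rfl⟩))
              rw [hJ, ← hrec]
              have hcond : ((('\r' : Char) == '-' || ('\r' : Char) == '*') && (d == ' ')) = false := by
                simp
              simp only [List.nil_append, hcond, Bool.false_eq_true, if_false, hcopy]
              split
              · next hx => simp at hx
              · next heq =>
                rw [List.cons.injEq, List.cons.injEq] at heq
                exact absurd heq.2.1 hd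
              · next hx c3 t3 hx2 =>
                rw [List.cons.injEq] at hx2
                obtain ⟨h1, h2⟩ := hx2
                subst h2
                simp
      | cons c b' =>
        cases b' with
        | nil =>
          have hAeq : pyA_line line = line := by rw [hAq, hb]
          have hJnil : PySem.Chars.join ['\n'] ((LN line).map pyA_line) = line := by
            have h2 := joinLN_nil line hnlP
            simp only [List.append_nil] at h2
            rw [h2, hAeq]
          rcases hr with h | ⟨t, h⟩ | ⟨t, h⟩ <;> subst h
          · have hcopy : pyB_copy (line ++ []) = (line, []) := pyB_copy_eq line [] hnlB (Or.inl rfl)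
            simp only [List.append_nil] at hcopy ⊢
            simp [hcopy, hJnil]
          · -- r = '\n' :: t
            have hrec := ih t (by simp at hlen; omega) (fun c hc => hdomr c (by simp [hc]))
            have hgo : pyB_go n [] = [] := by cases n <;> rfl
            have hJ : PySem.Chars.join ['\n'] ((LN (line ++ '\n' :: t)).map pyA_line) =
                line ++ '\n' :: PySem.Chars.join ['\n'] ((LN t).map pyA_line) := by
              rw [joinLN_cons line ('\n' :: t) hnlP (LN_nl t), hAeq]
            have hcopy : pyB_copy (line ++ '\n' :: t) = (line, '\n' :: t) :=
              pyB_copy_eq line _ hnlB (Or.inr (Or.inl ⟨t, rfl⟩))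
            cases t with
            | nil =>
              have hend : PySem.Chars.join ['\n'] ((LN ([] : List Char)).map pyA_line) = [] := by
                rw [show LN ([] : List Char) = [[]] from by rw [LN]]
                rw [List.map_cons, List.map_nil, PySem.Chars.join_singleton]
                rfl
              rw [hend] at hJ
              simp [hcopy, hJ, hgo]
            | cons e t2 => simp [hcopy, hJ, hrec]
          · -- r = '\r' :: t
            cases t with
            | nil =>
              have hgo : pyB_go n [] = [] := by cases n <;> rfl
              have hend : PySem.Chars.join ['\n'] ((LN ([] : List Char)).map pyA_line) = [] := by
                rw [show LN ([] : List Char) = [[]] from by rw [LN]]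
                rw [List.map_cons, List.map_nil, PySem.Chars.join_singleton]
                rfl
              have hJ : PySem.Chars.join ['\n'] ((LN (line ++ ['\r'])).map pyA_line) =
                  line ++ ['\n'] := by
                rw [joinLN_cons line ['\r'] hnlP LN_r1, hAeq, hend]
              have hcopy : pyB_copy (line ++ ['\r']) = (line, ['\r']) :=
                pyB_copy_eq line _ hnlB (Or.inr (Or.inr ⟨[], rfl⟩))
              simp [hcopy, hJ, hgo]
            | cons d t2 =>
              by_cases hd : d = '\n'
              · subst hd
                have hrec := ih t2 (by simp at hlen; omega)
                  (fun c hc => hdomr c (by simp [hc]))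
                have hJ : PySem.Chars.join ['\n'] ((LN (line ++ '\r' :: '\n' :: t2)).map pyA_line) =
                    line ++ '\n' :: PySem.Chars.join ['\n'] ((LN t2).map pyA_line) := by
                  rw [joinLN_cons line ('\r' :: '\n' :: t2) hnlP (LN_rn t2), hAeq]
                have hcopy : pyB_copy (line ++ '\r' :: '\n' :: t2) = (line, '\r' :: '\n' :: t2) :=
                  pyB_copy_eq line _ hnlB (Or.inr (Or.inr ⟨'\n' :: t2, rfl⟩))
                simp [hcopy, hJ, hrec]
              · have hrec := ih (d :: t2) (by simp at hlen ⊢; omega)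
                  (fun c hc => hdomr c (by simp at hc ⊢; tauto))
                have hJ : PySem.Chars.join ['\n'] ((LN (line ++ '\r' :: d :: t2)).map pyA_line) =
                    line ++ '\n' :: PySem.Chars.join ['\n'] ((LN (d :: t2)).map pyA_line) := by
                  rw [joinLN_cons line ('\r' :: d :: t2) hnlP (LN_r d t2 hd), hAeq]
                have hcopy : pyB_copy (line ++ '\r' :: d :: t2) = (line, '\r' :: d :: t2) :=
                  pyB_copy_eq line _ hnlB (Or.inr (Or.inr ⟨d :: t2, rfl⟩))
                rw [hJ, ← hrec]
                have hcond : ((c == '-' || c == '*') && (('\r' : Char) == ' ')) = false := by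
                  simp
                simp only [List.cons_append, List.nil_append, hcond, Bool.false_eq_true, if_false,
                  hcopy]
                split
                · next hx => simp at hx
                · next heq =>
                  rw [List.cons.injEq, List.cons.injEq] at heq
                  exact absurd heq.2.1 hd
                · next hx c3 t3 hx2 =>
                  rw [List.cons.injEq] at hx2
                  obtain ⟨h1, h2⟩ := hx2
                  subst h2
                  simp
        | cons d b'' =>
          have hsub : ∀ x ∈ b'', x ∈ line := by
            intro x hx
            have hxm : x ∈ line.dropWhile pyB_isST := by rw [hb]; simp [hx]
            exact (List.dropWhile_sublist _).subset hxm
          have hxB : ∀ x ∈ b'', (x == '\n' || x == '\r') = false := fun x hx => hnlB x (hsub x hx)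
          by_cases hcond : ((c == '-' || c == '*') && (d == ' ')) = true
          · have hAeq : pyA_line line =
                List.replicate (line.takeWhile pyB_isST).length ' ' ++ ['•', ' '] ++ b'' := by
              rw [hAq, hb]; simp [hcond]
            have hJnil : PySem.Chars.join ['\n'] ((LN line).map pyA_line) =
                List.replicate (line.takeWhile pyB_isST).length ' ' ++ ['•', ' '] ++ b'' := by
              have h2 := joinLN_nil line hnlP
              simp only [List.append_nil] at h2
              rw [h2, hAeq]
            rcases hr with h | ⟨t, h⟩ | ⟨t, h⟩ <;> subst h
            · have hcopy : pyB_copy (b'' ++ []) = (b'', []) := pyB_copy_eq b'' [] hxB (Or.inl rfl)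
              simp only [List.append_nil] at hcopy ⊢
              simp [hcond, hcopy, hJnil]
            · have hrec := ih t (by simp at hlen ⊢; omega) (fun x hx => hdomr x (by simp [hx]))
              have hgo : pyB_go n [] = [] := by cases n <;> rfl
              have hJ : PySem.Chars.join ['\n'] ((LN (line ++ '\n' :: t)).map pyA_line) =
                  (List.replicate (line.takeWhile pyB_isST).length ' ' ++ ['•', ' '] ++ b'') ++
                    '\n' :: PySem.Chars.join ['\n'] ((LN t).map pyA_line) := by
                rw [joinLN_cons line ('\n' :: t) hnlP (LN_nl t), hAeq]
              have hcopy : pyB_copy (b'' ++ '\n' :: t) = (b'', '\n' :: t) :=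
                pyB_copy_eq b'' _ hxB (Or.inr (Or.inl ⟨t, rfl⟩))
              cases t with
              | nil =>
                have hend : PySem.Chars.join ['\n'] ((LN ([] : List Char)).map pyA_line) = [] := by
                  rw [show LN ([] : List Char) = [[]] from by rw [LN]]
                  rw [List.map_cons, List.map_nil, PySem.Chars.join_singleton]
                  rfl
                rw [hend] at hJ
                simp [hcond, hcopy, hJ, hgo]
              | cons e t2 => simp [hcond, hcopy, hJ, hrec]
            · cases t with
              | nil =>
                have hgo : pyB_go n [] = [] := by cases n <;> rfl
                have hend : PySem.Chars.join ['\n'] ((LN ([] : List Char)).map pyA_line) = [] := by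
                  rw [show LN ([] : List Char) = [[]] from by rw [LN]]
                  rw [List.map_cons, List.map_nil, PySem.Chars.join_singleton]
                  rfl
                have hJ : PySem.Chars.join ['\n'] ((LN (line ++ ['\r'])).map pyA_line) =
                    (List.replicate (line.takeWhile pyB_isST).length ' ' ++ ['•', ' '] ++ b'') ++
                      ['\n'] := by
                  rw [joinLN_cons line ['\r'] hnlP LN_r1, hAeq, hend]
                have hcopy : pyB_copy (b'' ++ ['\r']) = (b'', ['\r']) :=
                  pyB_copy_eq b'' _ hxB (Or.inr (Or.inr ⟨[], rfl⟩))
                simp [hcond, hcopy, hJ, hgo]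
              | cons d' t2 =>
                by_cases hd : d' = '\n'
                · subst hd
                  have hrec := ih t2 (by simp at hlen ⊢; omega) (fun x hx => hdomr x (by simp [hx]))
                  have hJ : PySem.Chars.join ['\n'] ((LN (line ++ '\r' :: '\n' :: t2)).map pyA_line) =
                      (List.replicate (line.takeWhile pyB_isST).length ' ' ++ ['•', ' '] ++ b'') ++
                        '\n' :: PySem.Chars.join ['\n'] ((LN t2).map pyA_line) := by
                    rw [joinLN_cons line ('\r' :: '\n' :: t2) hnlP (LN_rn t2), hAeq]
                  have hcopy : pyB_copy (b'' ++ '\r' :: '\n' :: t2) = (b'', '\r' :: '\n' :: t2) :=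
                    pyB_copy_eq b'' _ hxB (Or.inr (Or.inr ⟨'\n' :: t2, rfl⟩))
                  simp [hcond, hcopy, hJ, hrec]
                · have hrec := ih (d' :: t2) (by simp at hlen ⊢; omega)
                    (fun x hx => hdomr x (by simp at hx ⊢; tauto))
                  have hJ : PySem.Chars.join ['\n'] ((LN (line ++ '\r' :: d' :: t2)).map pyA_line) =
                      (List.replicate (line.takeWhile pyB_isST).length ' ' ++ ['•', ' '] ++ b'') ++
                        '\n' :: PySem.Chars.join ['\n'] ((LN (d' :: t2)).map pyA_line) := by
                    rw [joinLN_cons line ('\r' :: d' :: t2) hnlP (LN_r d' t2 hd), hAeq]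
                  have hcopy : pyB_copy (b'' ++ '\r' :: d' :: t2) = (b'', '\r' :: d' :: t2) :=
                    pyB_copy_eq b'' _ hxB (Or.inr (Or.inr ⟨d' :: t2, rfl⟩))
                  rw [hJ, ← hrec]
                  simp only [List.cons_append, hcond, if_true, hcopy]
                  split
                  · next hx => simp at hx
                  · next heq =>
                    rw [List.cons.injEq, List.cons.injEq] at heq
                    exact absurd heq.2.1 hd
                  · next hx c3 t3 hx2 =>
                    rw [List.cons.injEq] at hx2
                    obtain ⟨h1, h2⟩ := hx2
                    subst h2
                    simp
          · have hcf : ((c == '-' || c == '*') && (d == ' ')) = false := by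
              simpa using hcond
            have hAeq : pyA_line line = line := by rw [hAq, hb]; simp [hcf]
            have hJnil : PySem.Chars.join ['\n'] ((LN line).map pyA_line) = line := by
              have h2 := joinLN_nil line hnlP
              simp only [List.append_nil] at h2
              rw [h2, hAeq]
            rcases hr with h | ⟨t, h⟩ | ⟨t, h⟩ <;> subst h
            · have hcopy : pyB_copy (line ++ []) = (line, []) := pyB_copy_eq line [] hnlB (Or.inl rfl)
              simp only [List.append_nil] at hcopy ⊢
              simp [hcf, hcopy, hJnil]
            · -- r = '\n' :: t
              have hrec := ih t (by simp at hlen; omega) (fun c hc => hdomr c (by simp [hc]))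
              have hgo : pyB_go n [] = [] := by cases n <;> rfl
              have hJ : PySem.Chars.join ['\n'] ((LN (line ++ '\n' :: t)).map pyA_line) =
                  line ++ '\n' :: PySem.Chars.join ['\n'] ((LN t).map pyA_line) := by
                rw [joinLN_cons line ('\n' :: t) hnlP (LN_nl t), hAeq]
              have hcopy : pyB_copy (line ++ '\n' :: t) = (line, '\n' :: t) :=
                pyB_copy_eq line _ hnlB (Or.inr (Or.inl ⟨t, rfl⟩))
              cases t with
              | nil =>
                have hend : PySem.Chars.join ['\n'] ((LN ([] : List Char)).map pyA_line) = [] := by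
                  rw [show LN ([] : List Char) = [[]] from by rw [LN]]
                  rw [List.map_cons, List.map_nil, PySem.Chars.join_singleton]
                  rfl
                rw [hend] at hJ
                simp [hcf, hcopy, hJ, hgo]
              | cons e t2 => simp [hcf, hcopy, hJ, hrec]
            · -- r = '\r' :: t
              cases t with
              | nil =>
                have hgo : pyB_go n [] = [] := by cases n <;> rfl
                have hend : PySem.Chars.join ['\n'] ((LN ([] : List Char)).map pyA_line) = [] := by
                  rw [show LN ([] : List Char) = [[]] from by rw [LN]]
                  rw [List.map_cons, List.map_nil, PySem.Chars.join_singleton]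
                  rfl
                have hJ : PySem.Chars.join ['\n'] ((LN (line ++ ['\r'])).map pyA_line) =
                    line ++ ['\n'] := by
                  rw [joinLN_cons line ['\r'] hnlP LN_r1, hAeq, hend]
                have hcopy : pyB_copy (line ++ ['\r']) = (line, ['\r']) :=
                  pyB_copy_eq line _ hnlB (Or.inr (Or.inr ⟨[], rfl⟩))
                simp [hcf, hcopy, hJ, hgo]
              | cons d t2 =>
                by_cases hd : d = '\n'
                · subst hd
                  have hrec := ih t2 (by simp at hlen; omega)
                    (fun c hc => hdomr c (by simp [hc]))
                  have hJ : PySem.Chars.join ['\n'] ((LN (line ++ '\r' :: '\n' :: t2)).map pyA_line) =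
                      line ++ '\n' :: PySem.Chars.join ['\n'] ((LN t2).map pyA_line) := by
                    rw [joinLN_cons line ('\r' :: '\n' :: t2) hnlP (LN_rn t2), hAeq]
                  have hcopy : pyB_copy (line ++ '\r' :: '\n' :: t2) = (line, '\r' :: '\n' :: t2) :=
                    pyB_copy_eq line _ hnlB (Or.inr (Or.inr ⟨'\n' :: t2, rfl⟩))
                  simp [hcf, hcopy, hJ, hrec]
                · have hrec := ih (d :: t2) (by simp at hlen ⊢; omega)
                    (fun c hc => hdomr c (by simp at hc ⊢; tauto))
                  have hJ : PySem.Chars.join ['\n'] ((LN (line ++ '\r' :: d :: t2)).map pyA_line) =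
                      line ++ '\n' :: PySem.Chars.join ['\n'] ((LN (d :: t2)).map pyA_line) := by
                    rw [joinLN_cons line ('\r' :: d :: t2) hnlP (LN_r d t2 hd), hAeq]
                  have hcopy : pyB_copy (line ++ '\r' :: d :: t2) = (line, '\r' :: d :: t2) :=
                    pyB_copy_eq line _ hnlB (Or.inr (Or.inr ⟨d :: t2, rfl⟩))
                  rw [hJ, ← hrec]
                  simp only [List.cons_append, hcf, Bool.false_eq_true, if_false, hcopy]
                  split
                  · next hx => simp at hx
                  · next heq =>
                    rw [List.cons.injEq, List.cons.injEq] at heq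
                    exact absurd heq.2.1 hd
                  · next hx c3 t3 hx2 =>
                    rw [List.cons.injEq] at hx2
                    obtain ⟨h1, h2⟩ := hx2
                    subst h2
                    simp


-- ===== VERDICT (by name: the statement is the Claim_ definition above) =====
theorem markdownish_to_plaintext_py_spec : Claim_equal_markdownish_to_plaintext_py := by
  intro s hdom
  unfold Spec_markdownish_to_plaintext_py markdownish_to_plaintext_py markdownish_to_plaintext_py_alt
  by_cases h : s.toList.isEmpty
  · rw [if_pos h]
    have he : s.toList = [] := by simpa using h
    rw [he]
    rfl
  · rw [if_neg h]
    have hdom' : ∀ c ∈ s.toList, pvDomChar c = true := by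
      have hh : pvDomStr s = true := hdom
      simpa [pvDomStr, List.all_eq_true] using hh
    rw [main_lemma (s.toList.length + 1) s.toList (by omega) hdom']
    simp only [replace_rn, replace_r, split_spec, LN_eq,
      PySem.List.foldl_append_singleton_eq_map, List.nil_append]
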